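-- pv_equiv track=rewrite | github.com/albert0796/DataStructure | hw2/heap_sort_03151107.py | DeleteMin
-- ===== SOURCE A (Python) =====
-- def DeleteMin(data):
--     last=len(data)-1
--     element=data[1]
--     index_root=1
--     index_c=index_root*2
--     while index_c <= last:
--         if index_c < last:
--             if data[index_c] > data[index_c+1]:
--                 index_c=index_c+1
--         if element > data[index_c]:
--             data[index_root]=data[index_c]
--             index_root=index_c
--             index_c=index_c*2
--         else:
--             break
--     data[index_root]=element
--     return data
-- ===== SOURCE B (Python) =====
-- # B: recursive swap-based sift-down (A percolates with a "hole"; B swaps and recurses).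
-- def _siftdown(data, root, last):
--     child = 2 * root
--     if child > last:
--         return
--     if child < last and data[child] > data[child + 1]:
--         child += 1
--     if data[root] > data[child]:
--         data[root], data[child] = data[child], data[root]
--         _siftdown(data, child, last)
--
-- def DeleteMin(data):
--     _siftdown(data, 1, len(data) - 1)
--     return data
-- ===== Notes on version B (the rewrite author's own statement) =====
-- stated objective: alternative
-- what changed: A percolates the root down iteratively with a hole (saves data[1], shifts children up, writes the saved element at the final hole); B is a recursive swap-based sift-down that swaps parent and smaller child and recurses.
import Mathlib
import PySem

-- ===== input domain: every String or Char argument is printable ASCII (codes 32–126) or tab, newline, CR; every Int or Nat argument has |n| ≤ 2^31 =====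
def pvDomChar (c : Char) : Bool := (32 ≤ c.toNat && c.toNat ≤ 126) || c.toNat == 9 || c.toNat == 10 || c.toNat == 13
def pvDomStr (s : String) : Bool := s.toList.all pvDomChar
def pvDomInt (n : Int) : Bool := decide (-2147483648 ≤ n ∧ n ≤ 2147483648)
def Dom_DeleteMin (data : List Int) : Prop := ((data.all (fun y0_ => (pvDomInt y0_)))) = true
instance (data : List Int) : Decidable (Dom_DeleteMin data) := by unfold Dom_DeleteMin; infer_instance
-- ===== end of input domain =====

-- B replaces A's iterative hole-percolation by a recursive swap-based sift-down (alternative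
-- decomposition, same cost). Both Pythons mutate the list in place and return it; the
-- equivalence proved here is about the returned value.

-- ===== PORT A =====
-- A's while loop; Python indices here are nonnegative, kept as Nat. fuel only makes the
-- recursion total (index_c at least doubles each iteration, so fuel = data.length suffices).
def DeleteMinLoop (fuel : Nat) (data : List Int) (element : Int) (root ic last : Nat) : List Int :=
  match fuel with
  | 0 => data.set root element
  | fuel + 1 =>
    if ic ≤ last then
      let ic := if ic < last ∧ data.getD ic 0 > data.getD (ic + 1) 0 then ic + 1 else ic
      if element > data.getD ic 0 then
        DeleteMinLoop fuel (data.set root (data.getD ic 0)) element ic (ic * 2) last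
      else
        data.set root element
    else
      data.set root element

def DeleteMin (data : List Int) : List Int :=
  let last := data.length - 1
  let element := data.getD 1 0        -- Python data[1]; IndexError for len < 2, excluded by Pre_
  DeleteMinLoop data.length data element 1 2 last

-- ===== PORT B =====
-- B's recursive _siftdown; same fuel discipline (totality only).
def siftdown (fuel : Nat) (data : List Int) (root last : Nat) : List Int :=
  match fuel with
  | 0 => data
  | fuel + 1 =>
    let child := 2 * root
    if child > last then data
    else
      let child := if child < last ∧ data.getD child 0 > data.getD (child + 1) 0 then child + 1 else child
      if data.getD root 0 > data.getD child 0 then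
        siftdown fuel ((data.set root (data.getD child 0)).set child (data.getD root 0)) child last
      else data

def DeleteMin_alt (data : List Int) : List Int :=
  siftdown data.length data 1 (data.length - 1)

-- ===== PRECONDITION & SPEC =====
-- Pre_: A reads data[1], so it raises IndexError on lists of length < 2.
def Pre_DeleteMin (data : List Int) : Prop := 2 ≤ data.length
instance (data : List Int) : Decidable (Pre_DeleteMin data) := by unfold Pre_DeleteMin; infer_instance
def pvWitness_DeleteMin : List Int := [3, 1, 4]

def Spec_DeleteMin (data : List Int) (out : List Int) : Prop := out = DeleteMin_alt data
instance (data : List Int) (out : List Int) : Decidable (Spec_DeleteMin data out) := by unfold Spec_DeleteMin; infer_instance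

-- ===== CLAIM (what is proved, stated in full; the proofs are below) =====
def Claim_equal_DeleteMin : Prop := ∀ (data : List Int), Dom_DeleteMin data → Pre_DeleteMin data → Spec_DeleteMin data (DeleteMin data)

-- ===== LEMMAS AND PROOFS =====

theorem gset_ne (l : List Int) (i j : Nat) (v : Int) (h : i ≠ j) :
    (l.set i v).getD j 0 = l.getD j 0 := by
  simp [List.getD_eq_getElem?_getD, List.getElem?_set_ne h]

theorem gset_self (l : List Int) (i : Nat) (v : Int) (h : i < l.length) :
    (l.set i v).getD i 0 = v := by
  simp [List.getD_eq_getElem?_getD, h]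

-- Invariant linking the two loops: A's state (data, element, root) with the hole at root
-- corresponds to B's state data.set root element.
theorem loop_eq (fuel : Nat) (data : List Int) (element : Int) (root last : Nat)
    (hroot : 1 ≤ root) (hlen : root < data.length) (hlast : last < data.length) :
    DeleteMinLoop fuel data element root (root * 2) last
      = siftdown fuel (data.set root element) root last := by
  induction fuel generalizing data root with
  | zero => simp [DeleteMinLoop, siftdown]
  | succ fuel ih =>
    simp only [DeleteMinLoop, siftdown]
    have hmc : 2 * root = root * 2 := Nat.mul_comm 2 root
    rw [hmc]
    by_cases hle : root * 2 ≤ last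
    · rw [if_pos hle, if_neg (by omega : ¬ root * 2 > last)]
      have hne1 : root ≠ root * 2 := by omega
      have hne2 : root ≠ root * 2 + 1 := by omega
      rw [gset_ne _ _ _ _ hne1, gset_ne _ _ _ _ hne2, gset_self _ _ _ hlen]
      by_cases htie : root * 2 < last ∧ data.getD (root * 2) 0 > data.getD (root * 2 + 1) 0
      · rw [if_pos htie, gset_ne _ _ _ _ hne2, List.set_set]
        by_cases hcmp : element > data.getD (root * 2 + 1) 0
        · simp only [if_pos hcmp]
          exact ih (data.set root (data.getD (root * 2 + 1) 0)) (root * 2 + 1)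
            (by omega) (by simp only [List.length_set]; omega) (by simp only [List.length_set]; omega)
        · simp only [if_neg hcmp]
      · rw [if_neg htie, gset_ne _ _ _ _ hne1, List.set_set]
        by_cases hcmp : element > data.getD (root * 2) 0
        · simp only [if_pos hcmp]
          exact ih (data.set root (data.getD (root * 2) 0)) (root * 2)
            (by omega) (by simp only [List.length_set]; omega) (by simp only [List.length_set]; omega)
        · simp only [if_neg hcmp]
    · rw [if_neg hle, if_pos (by omega : root * 2 > last)]

theorem set_getD_self (l : List Int) (i : Nat) (h : i < l.length) : l.set i (l.getD i 0) = l := by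
  rw [List.getD_eq_getElem l 0 h]
  exact List.set_getElem_self h

-- ===== VERDICT (by name: the statement is the Claim_ definition above) =====
theorem DeleteMin_spec : Claim_equal_DeleteMin := by
  intro data _ hpre
  unfold Pre_DeleteMin at hpre
  unfold Spec_DeleteMin DeleteMin DeleteMin_alt
  have h := loop_eq data.length data (data.getD 1 0) 1 (data.length - 1)
    (by omega) (by omega) (by omega)
  rw [set_getD_self data 1 (by omega)] at h
  simpa using h
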